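-- pv_equiv track=rewrite | github.com/EddieCarrillo/LearningPython3 | leetcode/teemoattacking.py | findPoisonedDuration
-- ===== SOURCE A (Python) =====
-- from typing import List
--
-- def findPoisonedDuration(timeSeries: List[int], duration: int) -> int:
--     active_start = timeSeries[0]
--     active_end = timeSeries[0] + duration - 1
--     total_duration = 0
--     for time_idx in range(1, len(timeSeries)):
--         cur_start = timeSeries[time_idx]
--         cur_end = cur_start + duration - 1
--         if cur_start <= active_end:
--             #overlap
--             active_end = cur_end
--         else:
--             #no overlap
--             total_duration += active_end - active_start + 1
--             active_start = cur_start
--             active_end = cur_end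
--     total_duration += active_end - active_start + 1
--
--     return total_duration
-- ===== SOURCE B (Python) =====
-- def findPoisonedDuration(timeSeries, duration):
--     total = duration
--     for prev, cur in zip(timeSeries, timeSeries[1:]):
--         total += min(duration, cur - prev)
--     return total
-- ===== Notes on version B (the rewrite author's own statement) =====
-- stated objective: idiomatic
-- what changed: B sums min(duration, gap) over consecutive pairs plus one final duration, instead of merging intervals with active_start/active_end state and an overlap branch; Pre_ excludes only the empty list, where A raises IndexError.
import Mathlib
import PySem

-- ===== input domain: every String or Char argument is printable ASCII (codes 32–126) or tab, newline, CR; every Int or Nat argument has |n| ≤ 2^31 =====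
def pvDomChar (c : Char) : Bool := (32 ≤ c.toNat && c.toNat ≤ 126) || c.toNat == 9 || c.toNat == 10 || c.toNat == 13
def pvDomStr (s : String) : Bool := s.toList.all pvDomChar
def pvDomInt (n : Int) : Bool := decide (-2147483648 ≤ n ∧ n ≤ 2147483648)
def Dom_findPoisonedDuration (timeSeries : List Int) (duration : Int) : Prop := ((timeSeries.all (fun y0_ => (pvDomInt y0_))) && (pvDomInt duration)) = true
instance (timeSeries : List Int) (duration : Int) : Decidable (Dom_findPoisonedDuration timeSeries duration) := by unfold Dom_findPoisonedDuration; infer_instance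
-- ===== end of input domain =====

-- B replaces A's interval-merging state machine (active_start/active_end, overlap branch)
-- by summing min(duration, gap) over consecutive pairs plus one final duration (idiomatic).

-- ===== PORT A =====
-- Python raises IndexError on timeSeries[0] for []; that input is excluded by Pre_ (the [] branch value is never claimed).
def findPoisonedDuration (timeSeries : List Int) (duration : Int) : Int :=
  match timeSeries with
  | [] => 0
  | t0 :: rest =>
    let st := rest.foldl (fun (st : Int × Int × Int) cur =>
      let activeStart := st.1
      let activeEnd := st.2.1
      let totalDuration := st.2.2
      let curEnd := cur + duration - 1
      if cur ≤ activeEnd then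
        (activeStart, curEnd, totalDuration)
      else
        (cur, curEnd, totalDuration + activeEnd - activeStart + 1))
      (t0, t0 + duration - 1, 0)
    st.2.2 + st.2.1 - st.1 + 1

-- ===== PORT B =====
def findPoisonedDuration_alt (timeSeries : List Int) (duration : Int) : Int :=
  (timeSeries.zip timeSeries.tail).foldl
    (fun total p => total + min duration (p.2 - p.1)) duration

-- ===== PRECONDITION & SPEC =====
-- Pre_ excludes only the empty list, on which Python A raises IndexError.
def Pre_findPoisonedDuration (timeSeries : List Int) (duration : Int) : Prop := timeSeries ≠ []
instance (timeSeries : List Int) (duration : Int) : Decidable (Pre_findPoisonedDuration timeSeries duration) := by unfold Pre_findPoisonedDuration; infer_instance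
def pvWitness_findPoisonedDuration : List Int × Int := ([1, 2, 8], 2)

def Spec_findPoisonedDuration (timeSeries : List Int) (duration : Int) (out : Int) : Prop := out = findPoisonedDuration_alt timeSeries duration
instance (timeSeries : List Int) (duration : Int) (out : Int) : Decidable (Spec_findPoisonedDuration timeSeries duration out) := by unfold Spec_findPoisonedDuration; infer_instance

-- ===== CLAIM (what is proved, stated in full; the proofs are below) =====
def Claim_equal_findPoisonedDuration : Prop := ∀ (timeSeries : List Int) (duration : Int), Dom_findPoisonedDuration timeSeries duration → Pre_findPoisonedDuration timeSeries duration → Spec_findPoisonedDuration timeSeries duration (findPoisonedDuration timeSeries duration)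

-- ===== LEMMAS AND PROOFS =====

-- Invariant: A's fold state after consuming a prefix ending in element `prev` is
-- (activeStart, prev + d - 1, total), and the final "close the last interval" sum
-- agrees with B's fold over the consecutive pairs of the remainder.
theorem fpd_inv (d : Int) (rest : List Int) : ∀ (prev activeStart total : Int),
    (let st := rest.foldl (fun (st : Int × Int × Int) cur =>
        let activeStart := st.1
        let activeEnd := st.2.1
        let totalDuration := st.2.2
        let curEnd := cur + d - 1
        if cur ≤ activeEnd then
          (activeStart, curEnd, totalDuration)
        else
          (cur, curEnd, totalDuration + activeEnd - activeStart + 1))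
        (activeStart, prev + d - 1, total)
     st.2.2 + st.2.1 - st.1 + 1)
    = ((prev :: rest).zip rest).foldl
        (fun total p => total + min d (p.2 - p.1))
        (total + (prev + d - 1) - activeStart + 1) := by
  induction rest with
  | nil => intro prev activeStart total; simp
  | cons r rs ih =>
    intro prev activeStart total
    simp only [List.zip_cons_cons, List.foldl_cons]
    by_cases h : r ≤ prev + d - 1
    · rw [show (if r ≤ prev + d - 1 then (activeStart, r + d - 1, total)
          else (r, r + d - 1, total + (prev + d - 1) - activeStart + 1)) =
          (activeStart, r + d - 1, total) from if_pos h]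
      rw [ih r activeStart total]
      congr 1
      omega
    · rw [show (if r ≤ prev + d - 1 then (activeStart, r + d - 1, total)
          else (r, r + d - 1, total + (prev + d - 1) - activeStart + 1)) =
          (r, r + d - 1, total + (prev + d - 1) - activeStart + 1) from if_neg h]
      rw [ih r r (total + (prev + d - 1) - activeStart + 1)]
      congr 1
      omega

-- ===== VERDICT (by name: the statement is the Claim_ definition above) =====
theorem findPoisonedDuration_spec : Claim_equal_findPoisonedDuration := by
  intro ts d _ hpre
  unfold Spec_findPoisonedDuration
  match ts with
  | [] => exact absurd rfl hpre
  | t0 :: rest =>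
    unfold findPoisonedDuration findPoisonedDuration_alt
    simp only [List.tail_cons]
    rw [fpd_inv d rest t0 t0 0]
    congr 1
    omega
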